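-- pv_equiv track=rewrite | github.com/MarkSunDev/todaydevotional | scraper_common.py | finalize_records
-- ===== SOURCE A (Python) =====
-- from typing import Iterable
--
-- def finalize_records(records_desc: Iterable[dict]) -> list[dict]:
--     newest_first = list(records_desc)
--     ordered = []
--     for idx, record in enumerate(reversed(newest_first), start=1):
--         record["id"] = idx
--         ordered.append(record)
--     ordered.sort(key=lambda item: item["id"], reverse=True)
--     return ordered
-- ===== SOURCE B (Python) =====
-- def finalize_records(records_desc):
--     ordered = list(records_desc)
--     n = len(ordered)
--     for i, record in enumerate(ordered):
--         record["id"] = n - i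
--     return ordered
-- ===== Notes on version B (the rewrite author's own statement) =====
-- stated objective: simpler
-- what changed: B assigns id = n - index in one forward pass over the list, instead of reversing, numbering from 1, and sorting back by id descending.
import Mathlib
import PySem

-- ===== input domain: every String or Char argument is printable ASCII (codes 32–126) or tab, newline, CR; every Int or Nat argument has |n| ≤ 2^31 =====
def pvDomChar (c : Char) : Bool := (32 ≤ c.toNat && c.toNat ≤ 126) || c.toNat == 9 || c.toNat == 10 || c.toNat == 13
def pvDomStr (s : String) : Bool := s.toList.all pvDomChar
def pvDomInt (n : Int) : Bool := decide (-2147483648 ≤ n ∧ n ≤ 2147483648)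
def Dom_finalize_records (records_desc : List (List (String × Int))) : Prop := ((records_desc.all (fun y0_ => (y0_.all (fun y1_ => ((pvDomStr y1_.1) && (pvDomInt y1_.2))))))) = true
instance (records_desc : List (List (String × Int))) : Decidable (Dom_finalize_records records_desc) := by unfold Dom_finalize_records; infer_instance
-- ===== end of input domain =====

-- B replaces A's reverse + enumerate-from-1 + sort-by-id-descending with a single
-- forward pass assigning id = n - index (objective: simpler).
-- A mutates the input dicts in place; the equivalence proved here is about the return value only.

-- ===== PORT A =====
-- record["id"] = v  (Python dict assignment; overwrite keeps position, new key appends)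
def pvSetId (r : List (String × Int)) (v : Int) : List (String × Int) :=
  ((PySem.Dict.mk r).insert "id" v).items

def finalize_records (records_desc : List (List (String × Int))) : List (List (String × Int)) :=
  let newest_first := records_desc
  -- for idx, record in enumerate(reversed(newest_first), start=1): record["id"] = idx; ordered.append(record)
  let ordered := (PySem.List.enumerate newest_first.reverse 1).foldl
      (fun acc p => acc ++ [pvSetId p.2 p.1]) []
  -- ordered.sort(key=lambda item: item["id"], reverse=True); item["id"] always present here, so getD is exact
  PySem.List.sorted ordered (fun item => (PySem.Dict.mk item).getD "id" 0) true

-- ===== PORT B =====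
def finalize_records_alt (records_desc : List (List (String × Int))) : List (List (String × Int)) :=
  let n : Int := records_desc.length
  (PySem.List.enumerate records_desc 0).map (fun p => pvSetId p.2 (n - p.1))

-- ===== PRECONDITION & SPEC =====
def Spec_finalize_records (records_desc : List (List (String × Int))) (out : List (List (String × Int))) : Prop := out = finalize_records_alt records_desc
instance (records_desc : List (List (String × Int))) (out : List (List (String × Int))) : Decidable (Spec_finalize_records records_desc out) := by unfold Spec_finalize_records; infer_instance

-- ===== CLAIM (what is proved, stated in full; the proofs are below) =====
def Claim_equal_finalize_records : Prop := ∀ (records_desc : List (List (String × Int))), Dom_finalize_records records_desc → Spec_finalize_records records_desc (finalize_records records_desc)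

-- ===== LEMMAS AND PROOFS =====

-- the assigned id is what the sort key reads back
theorem pvSetId_key (r : List (String × Int)) (v : Int) :
    (PySem.Dict.mk (pvSetId r v)).getD "id" 0 = v := by
  show ((PySem.Dict.mk r).insert "id" v).getD "id" 0 = v
  exact PySem.Dict.getD_insert_self _ _ _ _

-- reversing an enumeration of the reverse renumbers forward
theorem enum_rev (xs : List (List (String × Int))) (s t : Int) :
    (PySem.List.enumerate xs.reverse s).reverse
      = (PySem.List.enumerate xs t).map (fun p => (s + t + (xs.length : Int) - 1 - p.1, p.2)) := by
  induction xs generalizing t with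
  | nil => simp [PySem.List.enumerate_nil]
  | cons x xs ih =>
      rw [List.reverse_cons, PySem.List.enumerate_append, PySem.List.enumerate_cons,
        PySem.List.enumerate_nil, PySem.List.enumerate_cons]
      simp only [List.reverse_append, List.reverse_cons, List.reverse_nil, List.nil_append,
        List.cons_append, List.map_cons, List.length_cons, List.length_reverse]
      rw [ih (t + 1)]
      congr 1
      · simp only [Prod.mk.injEq, and_true]
        push_cast; ring
      · apply List.map_congr_left
        intro p _
        simp only [Prod.mk.injEq, and_true]
        push_cast; ring

theorem finalize_records_spec : Claim_equal_finalize_records := by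
  intro xs _
  unfold Spec_finalize_records finalize_records finalize_records_alt
  simp only []
  rw [PySem.List.foldl_append_singleton_eq_map]
  apply PySem.List.sorted_rev_eq_of_perm_of_pairwise_gt
  · -- the claimed result is a permutation of ordered
    calc (PySem.List.enumerate xs 0).map (fun p => pvSetId p.2 ((xs.length : Int) - p.1))
        = ((PySem.List.enumerate xs.reverse 1).reverse).map (fun p => pvSetId p.2 p.1) := by
          rw [enum_rev xs 1 0]
          rw [List.map_map]
          apply List.map_congr_left
          intro p _
          simp only [Function.comp]
          congr 1
          ring
      _ = ((PySem.List.enumerate xs.reverse 1).map (fun p => pvSetId p.2 p.1)).reverse := by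
          rw [List.map_reverse]
    exact (List.reverse_perm _).trans (List.Perm.refl _)
  · -- keys strictly decreasing along B's output
    rw [List.pairwise_map]
    have h := PySem.List.pairwise_lt_enumerate xs (0 : Int)
    refine h.imp ?_
    intro a b hab
    simp only [pvSetId_key]
    omega
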